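-- pv_equiv track=rewrite | github.com/alibaba/euler | euler/tools/util.py | convert_feature
-- ===== SOURCE A (Python) =====
-- def convert_feature(features):
--     feature_idx = []
--     feature = []
--     idx = 0
--     for t in features:
--         idx += len(t)
--         feature_idx.append(idx)
--         for f in t:
--             feature.append(f)
--     return feature_idx, feature
-- ===== SOURCE B (Python) =====
-- def convert_feature(features):
--     lens = [len(t) for t in features]
--     feature_idx = [sum(lens[:i + 1]) for i in range(len(lens))]
--     feature = [f for t in features for f in t]
--     return feature_idx, feature
-- ===== Notes on version B (the rewrite author's own statement) =====
-- stated objective: alternative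
-- what changed: Replaced A's single fused loop with a manual running offset by three independent passes: a per-segment length list, prefix sums of slices for feature_idx, and a flatten comprehension for feature.
import Mathlib
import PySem

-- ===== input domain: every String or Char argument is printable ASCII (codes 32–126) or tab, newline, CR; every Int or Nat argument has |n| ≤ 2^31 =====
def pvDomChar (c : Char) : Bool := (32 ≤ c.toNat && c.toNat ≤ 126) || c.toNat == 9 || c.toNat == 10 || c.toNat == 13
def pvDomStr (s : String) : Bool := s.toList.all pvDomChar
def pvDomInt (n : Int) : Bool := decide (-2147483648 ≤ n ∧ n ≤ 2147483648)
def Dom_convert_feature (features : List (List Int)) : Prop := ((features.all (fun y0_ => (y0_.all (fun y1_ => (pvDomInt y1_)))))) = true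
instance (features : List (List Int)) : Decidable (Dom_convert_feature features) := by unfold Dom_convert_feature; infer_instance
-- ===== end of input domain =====

-- B replaces A's single fused loop (running offset) by three independent passes
-- (lengths, prefix sums of slices, flatten comprehension); objective: alternative decomposition.

-- ===== PORT A =====
-- state: (feature_idx, feature, idx); appends transliterated as ++ [·]
def convert_feature (features : List (List Int)) : List Int × List Int :=
  let s := features.foldl
    (fun (st : List Int × List Int × Int) t =>
      let idx := st.2.2 + (t.length : Int)
      let feature_idx := st.1 ++ [idx]
      let feature := t.foldl (fun fe f => fe ++ [f]) st.2.1
      (feature_idx, feature, idx))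
    ([], [], 0)
  (s.1, s.2.1)

-- ===== PORT B =====
def convert_feature_alt (features : List (List Int)) : List Int × List Int :=
  let lens : List Int := features.map (fun t => (t.length : Int))
  let feature_idx : List Int :=
    (PySem.List.pyRange 0 (lens.length : Int) 1).map
      (fun i => (PySem.List.slice lens none (some (i + 1))).sum)
  let feature : List Int := features.flatMap (fun t => t)
  (feature_idx, feature)

-- ===== PRECONDITION & SPEC =====
def Spec_convert_feature (features : List (List Int)) (out : List Int × List Int) : Prop := out = convert_feature_alt features
instance (features : List (List Int)) (out : List Int × List Int) : Decidable (Spec_convert_feature features out) := by unfold Spec_convert_feature; infer_instance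

-- ===== CLAIM (what is proved, stated in full; the proofs are below) =====
def Claim_equal_convert_feature : Prop := ∀ (features : List (List Int)), Dom_convert_feature features → Spec_convert_feature features (convert_feature features)

-- ===== LEMMAS AND PROOFS =====

-- canonical index list: cumulative offsets starting from c
def pvIdxList : List (List Int) → Int → List Int
  | [], _ => []
  | t :: ts, c => (c + (t.length : Int)) :: pvIdxList ts (c + (t.length : Int))

theorem pv_foldl_append (t : List Int) (fe : List Int) :
    t.foldl (fun fe f => fe ++ [f]) fe = fe ++ t := by
  induction t generalizing fe with
  | nil => simp
  | cons x xs ih => simp [List.foldl, ih]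

theorem pv_A_loop (features : List (List Int)) (fi fe : List Int) (c : Int) :
    features.foldl
      (fun (st : List Int × List Int × Int) t =>
        let idx := st.2.2 + (t.length : Int)
        (st.1 ++ [idx], t.foldl (fun fe f => fe ++ [f]) st.2.1, idx))
      (fi, fe, c)
    = (fi ++ pvIdxList features c, fe ++ features.flatMap (fun t => t),
       c + ((features.map (fun t => (t.length : Int))).sum)) := by
  induction features generalizing fi fe c with
  | nil => simp [pvIdxList]
  | cons t ts ih =>
      simp only [List.foldl_cons]
      rw [ih]
      simp only [pv_foldl_append, pvIdxList, List.map, List.sum_cons, List.flatMap_cons,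
        Prod.mk.injEq]
      refine ⟨by simp, by simp, by ring⟩

theorem pv_B_idx (features : List (List Int)) (c : Int) :
    (List.range features.length).map
      (fun k => c + (((features.map (fun t => (t.length : Int))).take (k + 1)).sum))
    = pvIdxList features c := by
  induction features generalizing c with
  | nil => simp [pvIdxList]
  | cons t ts ih =>
      simp only [List.length_cons]
      rw [List.range_succ_eq_map]
      simp only [List.map_cons, List.map_map, pvIdxList]
      refine List.cons_eq_cons.mpr ⟨by simp, ?_⟩
      rw [← ih (c + (t.length : Int))]
      apply List.map_congr_left
      intro k _
      simp only [Function.comp_apply, List.take_succ_cons, List.sum_cons]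
      ring

-- ===== VERDICT (by name: the statement is the Claim_ definition above) =====
theorem convert_feature_spec : Claim_equal_convert_feature := by
  intro features _
  show _ = _
  unfold convert_feature convert_feature_alt
  simp only [pv_A_loop, List.nil_append, PySem.List.pyRange_zero_natCast, List.length_map,
    List.map_map]
  congr 1
  rw [← pv_B_idx features 0]
  apply List.map_congr_left
  intro k hk
  simp only [Function.comp_apply, zero_add]
  rw [show ((k : Int) + 1) = ((k + 1 : Nat) : Int) from by push_cast; ring,
    PySem.List.slice_to_natCast]
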